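/- GENERATED by tools/from_farm_form.py from prooffarm-gif/accepted/InternalRead/Proof.lean (a worked proof of the farm's unit `InternalRead`,
   accepted by the verdict) — do not edit. -/
import Gif.Spec.Units.InternalRead

open X86 X86.User Asan ProgX.Base ProgX.Base.Spec Gif.Spec

set_option maxRecDepth 4000
set_option maxHeartbeats 4000000

theorem Gif.Spec.Proved.InternalRead_ok : Gif.Spec.InternalRead.Statement := by
  intro Lay hLay μ hμ u₀ hcode h_load8 h_mem_read H rest frames F R n u ret he hpre
  v_entry he
  obtain ⟨henv, hrdi, hn, hn1, hn2, hbuf⟩ := hpre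
  have hmr := h_mem_read H rest frames F R n
  have hp := henv.heap
  have hok := henv.ok
  have hbase := hp.base
  have hlimit := hp.limit
  -- where gif and pv are
  have hgin := hok.owns.inside hp.inv.heap (o := (F.gif, 120)) List.mem_cons_self
  have hpin := hok.owns.inside hp.inv.heap (o := (F.pv, 24936)) (List.mem_cons_of_mem _ List.mem_cons_self)
  simp only at hgin hpin
  rw [hbase] at hgin hpin
  -- the two loads, as facts about the entry memory in the walker's form
  have hpriv := hok.shape.priv
  have hread := hok.shape.read
  simp only [gfield] at hpriv hread
  have l_priv : u.mem.readLE (u.reg .rdi + 0x70) 8 = F.pv := by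
    rw [rd_eq_readLE u.mem (u.reg .rdi + 0x70) (F.gif + 112) 8 (by u_omega)]
    exact hpriv
  have l_read : u.mem.readLE (UInt64.ofNat F.pv + 0x48) 8 = 0x105c60 := by
    rw [rd_eq_readLE u.mem (UInt64.ofNat F.pv + 0x48) (F.pv + 72) 8 (by u_omega)]
    exact hread
  u_walk hcode [hμ.vendor] span [ProgX.Base.L.textLo, ProgX.Base.L.textHi] side (v_side)
  case check_105f36 =>
    have hun : ShadowUntouched u.mem s_105f36.mem := by v_untouched
    have hl : LiveIn (H.liveObjs ++ rest) frames F.gif 120 := hok.gif_live.liveIn rest frames (Nat.le_refl _) (Nat.le_refl _)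
    exact hl.accSmall hp.inv.shadow hun _ 8 (by decide) (by u_omega) (by u_omega)
  case check_105f44 =>
    have hun : ShadowUntouched u.mem s_105f44.mem := by v_untouched
    have hl : LiveIn (H.liveObjs ++ rest) frames F.pv 24936 := hok.pv_live.liveIn rest frames (Nat.le_refl _) (Nat.le_refl _)
    exact hl.accSmall hp.inv.shadow hun _ 8 (by decide) (by u_omega) (by u_omega)
  case call_inv =>
    v_inv
  case pre_105f5b =>
    -- mem_read's precondition: the environment over the function's own stack stores, the same arguments
    have hun : ShadowUntouched u.mem s_105f5b.mem := by v_untouched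
    have hsame : Mem.SameExcept [⟨(u.reg .rsp).toNat - 176, (u.reg .rsp).toNat⟩] u.mem s_105f5b.mem := by u_same
    have hcur := henv.ctx.cursor_range hp.inv.shadow
    have henv' : Env H rest frames F R s_105f5b := by
      refine henv.sameExcept hun hsame ?_ ?_ ?_ ?_ ?_
      · intro w hw
        have e : w = ⟨(u.reg .rsp).toNat - 176, (u.reg .rsp).toNat⟩ := List.mem_singleton.mp hw
        subst e
        exact Loose.stack hp.inv.heap (by simp only; omega) (by simp only; omega) (by simp only; omega)
      · intro w hw
        have e : w = ⟨(u.reg .rsp).toNat - 176, (u.reg .rsp).toNat⟩ := List.mem_singleton.mp hw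
        subst e
        apply HeapWin.offHeap hp.inv.heap
        left
        simp only
        omega
      · rw [w_rsp]
        u_omega
      · rw [w_rsp]
        u_omega
      · rw [w_rsp]
        u_omega
    refine ⟨henv', ?_, ?_, hn1, hn2, ?_⟩
    · rw [w_rdi]
      exact hrdi
    · rw [w_rdx, toNat_ofBV32, toNat_part32, Nat.mod_mod]
      exact hn
    · rw [w_rsi]
      exact hbuf
  -- 0x105f5d: mem_read has returned
  have hpost : ReadPost H rest frames F R n s_105f5b s_105f5br := w_post
  clear w_post
  have hcur := henv.ctx.cursor_range hp.inv.shadow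
  -- the reader's measure at mem_read's entry is the entry's: only stack was stored to
  have hrem0 : rem R s_105f5b.mem = rem R u.mem := by
    have hsame0 : Mem.SameExcept [⟨(u.reg .rsp).toNat - 176, (u.reg .rsp).toNat⟩] u.mem s_105f5b.mem := by
      rw [w_mem_105f5b]
      u_same
    apply rem_sameExcept hsame0 (by omega)
    intro w hw
    have e : w = ⟨(u.reg .rsp).toNat - 176, (u.reg .rsp).toNat⟩ := List.mem_singleton.mp hw
    subst e
    simp only
    omega
  -- where the buffer is: off the function's stack
  have hbw := hbuf.live.where_ hp.inv.shadow hp.shadowPre.offText (by omega)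
  v_after_call w_rsp_105f5b w_mem_105f5b
  simp only [w_rsi_105f5b] at w_same
  have hp13 : UInt64.ofNat (s_105f5b.mem.readLE (u.reg .rsp - 8) 8) = u.reg .r13 := by u_resolve
  rw [w_mem_105f5b] at hp13
  have hs13 : UInt64.ofNat (s_105f5br.mem.readLE (u.reg .rsp - 8) 8) = u.reg .r13 := by u_frame hp13
  have hpbp : UInt64.ofNat (s_105f5b.mem.readLE (u.reg .rsp - 24) 8) = u.reg .rbp := by u_resolve
  rw [w_mem_105f5b] at hpbp
  have hsbp : UInt64.ofNat (s_105f5br.mem.readLE (u.reg .rsp - 24) 8) = u.reg .rbp := by u_frame hpbp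
  have hp12 : UInt64.ofNat (s_105f5b.mem.readLE (u.reg .rsp - 16) 8) = u.reg .r12 := by u_resolve
  rw [w_mem_105f5b] at hp12
  have hs12 : UInt64.ofNat (s_105f5br.mem.readLE (u.reg .rsp - 16) 8) = u.reg .r12 := by u_frame hp12
  have hpbx : UInt64.ofNat (s_105f5b.mem.readLE (u.reg .rsp - 32) 8) = u.reg .rbx := by u_resolve
  rw [w_mem_105f5b] at hpbx
  have hsbx : UInt64.ofNat (s_105f5br.mem.readLE (u.reg .rsp - 32) 8) = u.reg .rbx := by u_frame hpbx
  have hpra : UInt64.ofNat (s_105f5b.mem.readLE (u.reg .rsp) 8) = ret := by u_resolve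
  rw [w_mem_105f5b] at hpra
  have hsra : UInt64.ofNat (s_105f5br.mem.readLE (u.reg .rsp) 8) = ret := by u_frame hpra
  have hsame : Mem.SameExcept [⟨(u.reg .rsp).toNat - 176, (u.reg .rsp).toNat⟩,
      ⟨(u.reg .rsi).toNat, (u.reg .rsi).toNat + n⟩, ⟨R.cur, R.cur + 8⟩] u.mem s_105f5br.mem := by u_same
  obtain ⟨z, w_rax⟩ : ∃ z, s_105f5br.reg .rax = z := ⟨_, rfl⟩
  have e_rax := w_rax
  u_walk hcode [hμ.vendor] span [ProgX.Base.L.textLo, ProgX.Base.L.textHi] side (v_side)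
  refine ReachVia.done ?_
  v_returned
  -- the post: mem_read's, seen from this function's entry
  obtain ⟨k, hk1, hk2, hk3, hk4, hk5, hback⟩ := hpost
  refine ⟨k, hk1, ?_, ?_, ?_, ?_, ?_⟩
  · rw [← hrem0]
    exact hk2
  · rw [← hrem0]
    exact hk3
  · rw [w_rax, ← e_rax]
    exact hk4
  · rw [w_mem, ← hrem0]
    exact hk5
  · refine ⟨?_, ?_, ?_⟩
    · rw [w_mem]
      exact hp.raise_back hback.inv (by rw [w_rsp_105f5b]; u_omega)
    · rw [w_mem]
      exact hback.ok
    · rw [w_mem, ← hrem0]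
      exact hback.rem
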